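-- pv_equiv track=rewrite | github.com/BrianLusina/PythonSnips | pysnips/Strings/HowMuchLove/how_much_love.py | how_much_i_love_you
-- ===== SOURCE A (Python) =====
-- def how_much_i_love_you(nb_petals):
--     love = ["I love you", "a little", "a lot", "passionately", "madly", "not at all"]
--     while nb_petals > len(love):
--         nb_petals -= len(love)
--         if nb_petals in range(0, len(love)):
--             break
--         else:
--             continue
--
--     return love[nb_petals - 1]
-- ===== SOURCE B (Python) =====
-- def how_much_i_love_you(nb_petals):
--     love = ["I love you", "a little", "a lot", "passionately", "madly", "not at all"]
--     return love[(nb_petals - 1) % 6]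
-- ===== Notes on version B (the rewrite author's own statement) =====
-- stated objective: faster
-- what changed: Replaced the repeated-subtraction while loop by a single modulo computation (n-1) % 6 indexing the phrase list.
-- crash fix: For nb_petals <= -6 A raises IndexError (negative index past the front of the 6-element list) while B returns the cyclically correct phrase love[(nb_petals-1) % 6]. — e.g. on how_much_i_love_you(-6): A raises IndexError, B returns "not at all"
import Mathlib
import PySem

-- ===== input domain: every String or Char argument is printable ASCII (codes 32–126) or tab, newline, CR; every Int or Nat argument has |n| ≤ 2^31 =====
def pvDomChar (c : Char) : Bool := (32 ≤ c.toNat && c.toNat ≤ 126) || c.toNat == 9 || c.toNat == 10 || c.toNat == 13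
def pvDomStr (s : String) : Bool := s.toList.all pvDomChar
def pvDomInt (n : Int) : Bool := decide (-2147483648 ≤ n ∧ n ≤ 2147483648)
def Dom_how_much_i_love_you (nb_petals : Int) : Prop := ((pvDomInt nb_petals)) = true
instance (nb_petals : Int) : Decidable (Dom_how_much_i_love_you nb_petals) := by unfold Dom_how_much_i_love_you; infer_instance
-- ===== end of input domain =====

-- B replaces A's repeated-subtraction while loop by a single (n-1) % 6 modulo lookup (faster).

-- ===== PORT A =====
-- the while loop of A: repeatedly subtract len(love)=6 while nb_petals > 6, breaking once in range(0,6)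
def howLoveLoop (nb_petals : Int) : Int :=
  if 6 < nb_petals then
    if 0 ≤ nb_petals - 6 ∧ nb_petals - 6 < 6 then nb_petals - 6 else howLoveLoop (nb_petals - 6)
  else nb_petals
termination_by nb_petals.toNat
decreasing_by omega

def how_much_i_love_you (nb_petals : Int) : String :=
  let love := ["I love you", "a little", "a lot", "passionately", "madly", "not at all"]
  (PySem.List.pyGet? love (howLoveLoop nb_petals - 1)).getD ""  -- none (IndexError) excluded by Pre_

-- ===== PORT B =====
def how_much_i_love_you_alt (nb_petals : Int) : String :=
  let love := ["I love you", "a little", "a lot", "passionately", "madly", "not at all"]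
  (PySem.List.pyGet? love (PySem.Int.mod (nb_petals - 1) 6)).getD ""  -- index always in [0,6): never IndexError

-- ===== PRECONDITION & SPEC =====
-- A raises IndexError for nb_petals ≤ -6 (negative index past the front of the 6-element list)
def Pre_how_much_i_love_you (nb_petals : Int) : Prop := -5 ≤ nb_petals
instance (nb_petals : Int) : Decidable (Pre_how_much_i_love_you nb_petals) := by unfold Pre_how_much_i_love_you; infer_instance
def pvWitness_how_much_i_love_you : Int := 3

-- For nb_petals ≤ -6 A raises IndexError while B returns the cyclically correct phrase love[(nb_petals-1) % 6].
def Raises_how_much_i_love_you (nb_petals : Int) : Prop := nb_petals ≤ -6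
instance (nb_petals : Int) : Decidable (Raises_how_much_i_love_you nb_petals) := by unfold Raises_how_much_i_love_you; infer_instance
def pvRaiseWitness_how_much_i_love_you : Int := -6
def pvRaiseWitnessOut_how_much_i_love_you : String := "not at all"

def Spec_how_much_i_love_you (nb_petals : Int) (out : String) : Prop := out = how_much_i_love_you_alt nb_petals
instance (nb_petals : Int) (out : String) : Decidable (Spec_how_much_i_love_you nb_petals out) := by unfold Spec_how_much_i_love_you; infer_instance

-- ===== CLAIM (what is proved, stated in full; the proofs are below) =====
def Claim_equal_how_much_i_love_you : Prop := ∀ (nb_petals : Int), Dom_how_much_i_love_you nb_petals → Pre_how_much_i_love_you nb_petals → Spec_how_much_i_love_you nb_petals (how_much_i_love_you nb_petals)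
def Claim_raises_how_much_i_love_you : Prop := (∀ (nb_petals : Int), Dom_how_much_i_love_you nb_petals → Raises_how_much_i_love_you nb_petals → ¬ Pre_how_much_i_love_you nb_petals) ∧ (Dom_how_much_i_love_you (pvRaiseWitness_how_much_i_love_you) ∧ Raises_how_much_i_love_you (pvRaiseWitness_how_much_i_love_you) ∧ how_much_i_love_you_alt (pvRaiseWitness_how_much_i_love_you) = pvRaiseWitnessOut_how_much_i_love_you)

-- ===== LEMMAS AND PROOFS =====
theorem howLoveLoop_eq (n : Int) (h : 1 ≤ n) : howLoveLoop n = (n - 1) % 6 + 1 := by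
  rw [howLoveLoop.eq_def]
  split_ifs with h6 hb
  · omega
  · rw [howLoveLoop_eq (n - 6) (by omega)]; omega
  · omega
termination_by n.toNat
decreasing_by omega

-- ===== VERDICT (by name: the statement is the Claim_ definition above) =====
theorem how_much_i_love_you_spec : Claim_equal_how_much_i_love_you := by
  intro n _ hpre
  unfold Spec_how_much_i_love_you how_much_i_love_you how_much_i_love_you_alt
  by_cases h1 : 1 ≤ n
  · rw [howLoveLoop_eq n h1, PySem.Int.mod_eq_emod_of_pos (by norm_num)]
    norm_num
  · have hpre' : -5 ≤ n := hpre
    rw [howLoveLoop.eq_def, if_neg (by omega : ¬ 6 < n)]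
    interval_cases n <;> decide

@[simp] theorem how_much_i_love_you_raises : Claim_raises_how_much_i_love_you := by
  unfold Claim_raises_how_much_i_love_you
  constructor
  · intro n _ hr hp
    exact absurd hp (by unfold Pre_how_much_i_love_you Raises_how_much_i_love_you at *; omega)
  · refine ⟨by decide, by decide, by decide⟩
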